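-- pv_equiv track=rewrite | github.com/justinshenk/temporal-awareness | src/intertemporal/sae/sae_positions.py | _find_marker_token_position
-- ===== SOURCE A (Python) =====
-- def _find_marker_token_position(
--     tokens: list[str], marker: str, from_end: bool = False
-- ) -> int:
--     """Find the token position of a text marker.
--
--     Args:
--         tokens: List of decoded token strings
--         marker: Text to search for
--         from_end: If True, search from end of sequence
--
--     Returns:
--         Token index where marker is found, or -1 if not found
--     """
--     marker_lower = marker.lower().strip()
--
--     # For searching, we look for the token that contains the marker
--     indices = range(len(tokens) - 1, -1, -1) if from_end else range(len(tokens))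
--
--     for i in indices:
--         tok = tokens[i].lower().strip()
--         if marker_lower in tok or tok in marker_lower:
--             return i
--
--     # Second pass: check for partial matches at word boundaries
--     for i in indices:
--         tok = tokens[i].lower().strip()
--         # Handle punctuation-attached tokens
--         tok_clean = tok.rstrip(":,.")
--         marker_clean = marker_lower.rstrip(":,.")
--         if tok_clean == marker_clean:
--             return i
--
--     return -1
-- ===== SOURCE B (Python) =====
-- def _find_marker_token_position(
--     tokens: list[str], marker: str, from_end: bool = False
-- ) -> int:
--     marker_lower = marker.lower().strip()
--     marker_clean = marker_lower.rstrip(":,.")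
--     pairs = list(enumerate(t.lower().strip() for t in tokens))
--     if from_end:
--         pairs.reverse()
--     hit = None
--     fallback = None
--     for i, tok in pairs:
--         if hit is None and (marker_lower in tok or tok in marker_lower):
--             hit = i
--         if fallback is None and tok.rstrip(":,.") == marker_clean:
--             fallback = i
--     if hit is not None:
--         return hit
--     if fallback is not None:
--         return fallback
--     return -1
-- ===== Notes on version B (the rewrite author's own statement) =====
-- stated objective: alternative
-- what changed: B normalizes all tokens once via enumerate, optionally reverses the pair list, and runs a single fold that records the first containment match and the first punctuation-stripped equality match in two option accumulators, instead of A's two sequential index-range scans.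
import Mathlib
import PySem

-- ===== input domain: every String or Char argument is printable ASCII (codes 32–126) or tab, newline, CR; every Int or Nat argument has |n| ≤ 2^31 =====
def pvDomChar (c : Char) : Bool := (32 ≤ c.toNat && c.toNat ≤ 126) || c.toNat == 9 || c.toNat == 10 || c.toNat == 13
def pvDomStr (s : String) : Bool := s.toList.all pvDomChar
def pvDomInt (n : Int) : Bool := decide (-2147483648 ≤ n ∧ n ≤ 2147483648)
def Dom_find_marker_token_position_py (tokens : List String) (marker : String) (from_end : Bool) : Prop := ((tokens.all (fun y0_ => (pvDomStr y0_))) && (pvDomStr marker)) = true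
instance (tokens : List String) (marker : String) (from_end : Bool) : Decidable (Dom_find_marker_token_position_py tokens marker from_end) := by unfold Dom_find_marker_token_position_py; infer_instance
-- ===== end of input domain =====

-- B replaces A's two sequential index-range scans by one enumerate+fold over pre-normalized
-- tokens with two option accumulators; objective: alternative decomposition, same cost.

-- shared primitive: s.rstrip(":,.") — exact port of Python's rstrip with a char set
-- (drops the longest trailing run of characters from the set)
def pyRstripPunct (s : String) : String :=
  String.ofList ((s.toList.reverse.dropWhile (fun c => c == ':' || c == ',' || c == '.')).reverse)

-- ===== PORT A =====
-- first loop: return first i with marker_lower in tok or tok in marker_lower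
def aPass1 (tokens : List String) (ml : String) : List Int → Option Int
  | [] => none
  | i :: rest =>
    -- tok = tokens[i].lower().strip(), inlined; indices are always valid so .getD "" is never taken
    if PySem.Str.isIn ml (PySem.Str.strip (PySem.Str.lower ((PySem.List.pyGet? tokens i).getD ""))) || PySem.Str.isIn (PySem.Str.strip (PySem.Str.lower ((PySem.List.pyGet? tokens i).getD ""))) ml then some i
    else aPass1 tokens ml rest

-- second loop: return first i whose punctuation-stripped token equals the stripped marker
def aPass2 (tokens : List String) (ml : String) : List Int → Option Int
  | [] => none
  | i :: rest =>
    if pyRstripPunct (PySem.Str.strip (PySem.Str.lower ((PySem.List.pyGet? tokens i).getD ""))) == pyRstripPunct ml then some i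
    else aPass2 tokens ml rest

def find_marker_token_position_py (tokens : List String) (marker : String) (from_end : Bool) : Int :=
  let ml := PySem.Str.strip (PySem.Str.lower marker)
  let indices := if from_end then PySem.List.pyRange ((tokens.length : Int) - 1) (-1) (-1)
                 else PySem.List.pyRange 0 (tokens.length : Int) 1
  match aPass1 tokens ml indices with
  | some i => i
  | none =>
    match aPass2 tokens ml indices with
    | some i => i
    | none => -1

-- ===== PORT B =====
-- fold step over (index, normalized token) pairs: record first containment hit, first clean-equality hit
def bStep (ml mc : String) (st : Option Int × Option Int) (p : Int × String) : Option Int × Option Int :=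
  ( if st.1.isNone && (PySem.Str.isIn ml p.2 || PySem.Str.isIn p.2 ml) then some p.1 else st.1,
    if st.2.isNone && (pyRstripPunct p.2 == mc) then some p.1 else st.2 )

def find_marker_token_position_py_alt (tokens : List String) (marker : String) (from_end : Bool) : Int :=
  let ml := PySem.Str.strip (PySem.Str.lower marker)
  let mc := pyRstripPunct ml
  let pairs0 := PySem.List.enumerate (tokens.map (fun t => PySem.Str.strip (PySem.Str.lower t))) 0
  let pairs := if from_end then pairs0.reverse else pairs0
  let r := pairs.foldl (bStep ml mc) (none, none)
  match r.1 with
  | some i => i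
  | none =>
    match r.2 with
    | some j => j
    | none => -1

-- ===== PRECONDITION & SPEC =====
def Spec_find_marker_token_position_py (tokens : List String) (marker : String) (from_end : Bool) (out : Int) : Prop := out = find_marker_token_position_py_alt tokens marker from_end
instance (tokens : List String) (marker : String) (from_end : Bool) (out : Int) : Decidable (Spec_find_marker_token_position_py tokens marker from_end out) := by unfold Spec_find_marker_token_position_py; infer_instance

-- ===== CLAIM =====
def Claim_equal_find_marker_token_position_py : Prop := ∀ (tokens : List String) (marker : String) (from_end : Bool), Dom_find_marker_token_position_py tokens marker from_end → Spec_find_marker_token_position_py tokens marker from_end (find_marker_token_position_py tokens marker from_end)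

-- ===== LEMMAS AND PROOFS =====

-- normalization, the two pair predicates, and the index→pair map, abbreviations for the proofs
def nf (t : String) : String := PySem.Str.strip (PySem.Str.lower t)
def c1 (ml : String) (p : Int × String) : Bool := PySem.Str.isIn ml p.2 || PySem.Str.isIn p.2 ml
def c2 (mc : String) (p : Int × String) : Bool := pyRstripPunct p.2 == mc
def gPair (tokens : List String) (i : Int) : Int × String := (i, nf ((PySem.List.pyGet? tokens i).getD ""))

-- the two components of bStep, for reasoning about them separately
def bStep1 (ml : String) (h : Option Int) (p : Int × String) : Option Int :=
  if h.isNone && c1 ml p then some p.1 else h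
def bStep2 (mc : String) (f : Option Int) (p : Int × String) : Option Int :=
  if f.isNone && c2 mc p then some p.1 else f

theorem aPass1_cons (tokens : List String) (ml : String) (i : Int) (rest : List Int) :
    aPass1 tokens ml (i :: rest) = if c1 ml (gPair tokens i) then some i else aPass1 tokens ml rest := rfl

theorem aPass2_cons (tokens : List String) (ml : String) (i : Int) (rest : List Int) :
    aPass2 tokens ml (i :: rest) = if c2 (pyRstripPunct ml) (gPair tokens i) then some i else aPass2 tokens ml rest := rfl

theorem aPass1_eq_find (tokens : List String) (ml : String) (l : List Int) :
    aPass1 tokens ml l = ((l.map (gPair tokens)).find? (c1 ml)).map (·.1) := by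
  induction l with
  | nil => rfl
  | cons i rest ih =>
    rw [List.map_cons, aPass1_cons]
    by_cases h : c1 ml (gPair tokens i) = true
    · rw [if_pos h, List.find?_cons_of_pos h]; rfl
    · rw [if_neg h, List.find?_cons_of_neg h, ih]

theorem aPass2_eq_find (tokens : List String) (ml : String) (l : List Int) :
    aPass2 tokens ml l = ((l.map (gPair tokens)).find? (c2 (pyRstripPunct ml))).map (·.1) := by
  induction l with
  | nil => rfl
  | cons i rest ih =>
    rw [List.map_cons, aPass2_cons]
    by_cases h : c2 (pyRstripPunct ml) (gPair tokens i) = true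
    · rw [if_pos h, List.find?_cons_of_pos h]; rfl
    · rw [if_neg h, List.find?_cons_of_neg h, ih]

-- the pair fold splits into two independent one-component folds
theorem foldl_bStep_split (ml mc : String) (ps : List (Int × String)) : ∀ (h f : Option Int),
    ps.foldl (bStep ml mc) (h, f) = (ps.foldl (bStep1 ml) h, ps.foldl (bStep2 mc) f) := by
  induction ps with
  | nil => intro h f; rfl
  | cons p rest ih =>
    intro h f
    rw [List.foldl_cons, List.foldl_cons, List.foldl_cons,
        show bStep ml mc (h, f) p = (bStep1 ml h p, bStep2 mc f p) from rfl, ih]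

theorem foldl_bStep1_some (ml : String) (ps : List (Int × String)) : ∀ (a : Int),
    ps.foldl (bStep1 ml) (some a) = some a := by
  induction ps with
  | nil => intro a; rfl
  | cons p rest ih =>
    intro a
    rw [List.foldl_cons, show bStep1 ml (some a) p = some a from rfl, ih]

theorem foldl_bStep2_some (mc : String) (ps : List (Int × String)) : ∀ (a : Int),
    ps.foldl (bStep2 mc) (some a) = some a := by
  induction ps with
  | nil => intro a; rfl
  | cons p rest ih =>
    intro a
    rw [List.foldl_cons, show bStep2 mc (some a) p = some a from rfl, ih]

theorem foldl_bStep1_none (ml : String) (ps : List (Int × String)) :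
    ps.foldl (bStep1 ml) none = (ps.find? (c1 ml)).map (·.1) := by
  induction ps with
  | nil => rfl
  | cons p rest ih =>
    rw [List.foldl_cons]
    by_cases h : c1 ml p = true
    · rw [show bStep1 ml none p = if c1 ml p then some p.1 else none from rfl, if_pos h,
          foldl_bStep1_some, List.find?_cons_of_pos h]; rfl
    · rw [show bStep1 ml none p = if c1 ml p then some p.1 else none from rfl, if_neg h,
          List.find?_cons_of_neg h, ih]

theorem foldl_bStep2_none (mc : String) (ps : List (Int × String)) :
    ps.foldl (bStep2 mc) none = (ps.find? (c2 mc)).map (·.1) := by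
  induction ps with
  | nil => rfl
  | cons p rest ih =>
    rw [List.foldl_cons]
    by_cases h : c2 mc p = true
    · rw [show bStep2 mc none p = if c2 mc p then some p.1 else none from rfl, if_pos h,
          foldl_bStep2_some, List.find?_cons_of_pos h]; rfl
    · rw [show bStep2 mc none p = if c2 mc p then some p.1 else none from rfl, if_neg h,
          List.find?_cons_of_neg h, ih]

-- element k of enumerate
theorem enumerate_getElem? {α : Type} (xs : List α) : ∀ (s : Int) (k : Nat),
    (PySem.List.enumerate xs s)[k]? = (xs[k]?).map (fun x => (s + k, x)) := by
  induction xs with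
  | nil => intro s k; rfl
  | cons x xs ih =>
    intro s k
    rw [PySem.List.enumerate_cons]
    cases k with
    | zero => simp
    | succ k =>
      rw [List.getElem?_cons_succ, List.getElem?_cons_succ, ih (s + 1) k]
      cases xs[k]? <;> simp <;> push_cast <;> ring

-- B's forward pair list is A's forward index list mapped through gPair
theorem pairs_forward (tokens : List String) :
    (PySem.List.pyRange 0 (tokens.length : Int) 1).map (gPair tokens) =
      PySem.List.enumerate (tokens.map nf) 0 := by
  apply List.ext_getElem?
  intro k
  rw [List.getElem?_map, PySem.List.getElem?_pyRange_one, enumerate_getElem?, List.getElem?_map]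
  by_cases hk : k < tokens.length
  · rw [if_pos (by omega)]
    have : tokens[k]? = some tokens[k] := List.getElem?_eq_getElem hk
    simp only [this, Option.map_some, Option.map_some, gPair, zero_add]
    have hg : PySem.List.pyGet? tokens ((k : Int)) = some tokens[k] := by
      rw [PySem.List.pyGet?_natCast]; exact this
    rw [hg]
    rfl
  · rw [if_neg (by omega)]
    have : tokens[k]? = none := List.getElem?_eq_none (by omega)
    simp [this]

-- B's backward pair list likewise
theorem pairs_backward (tokens : List String) :
    (PySem.List.pyRange ((tokens.length : Int) - 1) (-1) (-1)).map (gPair tokens) =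
      (PySem.List.enumerate (tokens.map nf) 0).reverse := by
  have h := PySem.List.pyRange_neg_one_eq_reverse ((tokens.length : Int) - 1) (-1)
  rw [show ((-1 : Int) + 1) = 0 by ring, show ((tokens.length : Int) - 1 + 1) = (tokens.length : Int) by ring] at h
  rw [h, List.map_reverse, pairs_forward]

-- ===== VERDICT =====
theorem find_marker_token_position_py_spec : Claim_equal_find_marker_token_position_py := by
  intro tokens marker from_end _
  unfold Spec_find_marker_token_position_py
  simp only [find_marker_token_position_py, find_marker_token_position_py_alt]
  rw [aPass1_eq_find, aPass2_eq_find, foldl_bStep_split, foldl_bStep1_none, foldl_bStep2_none]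
  have hpairs : (if from_end then PySem.List.pyRange ((tokens.length : Int) - 1) (-1) (-1)
                 else PySem.List.pyRange 0 (tokens.length : Int) 1).map (gPair tokens) =
      (if from_end then (PySem.List.enumerate (tokens.map (fun t => PySem.Str.strip (PySem.Str.lower t))) 0).reverse
       else PySem.List.enumerate (tokens.map (fun t => PySem.Str.strip (PySem.Str.lower t))) 0) := by
    cases from_end
    · simpa [nf] using pairs_forward tokens
    · simpa [nf] using pairs_backward tokens
  rw [hpairs]
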